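-- pv_equiv track=rewrite | github.com/skdreier/religion-politics | sampling_religious_captures_without_pig/pull_out_all_religious_matches_with_local_context.py | get_start_ind_of_context
-- ===== SOURCE A (Python) =====
-- def get_start_ind_of_next_word_to_left(doc, cur_ind):
--     # assumes that next ind to left of cur_ind points to a space
--     cur_ind -= 1
--     while cur_ind > 0 and doc[cur_ind] == ' ':
--         cur_ind -= 1
--     if cur_ind == 0:
--         return 0
--     while cur_ind > 0 and doc[cur_ind] != ' ':
--         cur_ind -= 1
--     if doc[cur_ind] == ' ':
--         return cur_ind + 1
--     else:
--         return cur_ind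
--
-- def get_start_ind_of_context(doc, start_ind_of_match, cws):
--     num_complete_words_captured_so_far = 0
--     cur_ind = start_ind_of_match
--     if cur_ind == 0:
--         return 0
--     while cur_ind > 0 and num_complete_words_captured_so_far < cws:
--         cur_ind = get_start_ind_of_next_word_to_left(doc, cur_ind)
--         num_complete_words_captured_so_far += 1
--     return cur_ind
-- ===== SOURCE B (Python) =====
-- def get_start_ind_of_context(doc, start_ind_of_match, cws):
--     # Non-positive start index or non-positive word count: nothing to scan.
--     if start_ind_of_match <= 0 or cws <= 0:
--         return start_ind_of_match
--     # Word-start positions in the prefix before the match.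
--     starts = [i for i in range(min(start_ind_of_match, len(doc)))
--               if doc[i] != ' ' and (i == 0 or doc[i - 1] == ' ')]
--     return starts[len(starts) - cws] if cws <= len(starts) else 0
-- ===== Notes on version B (the rewrite author's own statement) =====
-- stated objective: simpler
-- what changed: Replaces the two cooperating left-scanning while-loop helpers with a single comprehension that builds the list of word-start indices in the prefix and indexes it cws words from the end (clamping to 0); Pre_ excludes the inputs (start index past the end of doc) where A raises IndexError.
import Mathlib
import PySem

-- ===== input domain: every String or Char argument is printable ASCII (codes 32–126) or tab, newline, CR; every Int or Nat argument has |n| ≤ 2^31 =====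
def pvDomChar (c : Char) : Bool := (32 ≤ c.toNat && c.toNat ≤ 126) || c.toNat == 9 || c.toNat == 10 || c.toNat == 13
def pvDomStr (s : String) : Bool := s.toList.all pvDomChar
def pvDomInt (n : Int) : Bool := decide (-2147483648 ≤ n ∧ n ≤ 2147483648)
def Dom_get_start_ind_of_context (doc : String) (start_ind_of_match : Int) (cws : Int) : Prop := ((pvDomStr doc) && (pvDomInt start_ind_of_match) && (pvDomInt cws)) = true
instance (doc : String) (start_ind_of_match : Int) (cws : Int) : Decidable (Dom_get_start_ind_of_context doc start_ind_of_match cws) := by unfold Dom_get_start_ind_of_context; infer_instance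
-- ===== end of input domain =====

-- B replaces A's two cooperating left-scanning while-loop helpers by one pass that
-- collects the word-start indices of the prefix and indexes that list (objective: simpler).

-- ===== PORT A =====
-- doc[i] is read via PySem.List.pyGet? (none = IndexError); the .getD default is only
-- reached where the Python raises, which Pre_ excludes.

-- first inner while of get_start_ind_of_next_word_to_left: skip spaces leftwards
def aSkipSpaces (doc : List Char) (j : Int) : Int :=
  if h : 0 < j ∧ (PySem.List.pyGet? doc j).getD ' ' = ' ' then aSkipSpaces doc (j - 1)
  else j
termination_by j.toNat
decreasing_by obtain ⟨h1, _⟩ := h; omega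

-- second inner while: skip non-spaces leftwards
def aSkipNonspaces (doc : List Char) (j : Int) : Int :=
  if h : 0 < j ∧ ¬ (PySem.List.pyGet? doc j).getD ' ' = ' ' then aSkipNonspaces doc (j - 1)
  else j
termination_by j.toNat
decreasing_by obtain ⟨h1, _⟩ := h; omega

def get_start_ind_of_next_word_to_left (doc : List Char) (cur_ind : Int) : Int :=
  let j := aSkipSpaces doc (cur_ind - 1)
  if j = 0 then 0
  else
    let j2 := aSkipNonspaces doc j
    if (PySem.List.pyGet? doc j2).getD ' ' = ' ' then j2 + 1 else j2

-- the outer while of get_start_ind_of_context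
def aLoop (doc : List Char) (cur_ind : Int) (num : Int) (cws : Int) : Int :=
  if h : 0 < cur_ind ∧ num < cws then
    aLoop doc (get_start_ind_of_next_word_to_left doc cur_ind) (num + 1) cws
  else cur_ind
termination_by (cws - num).toNat
decreasing_by obtain ⟨_, h2⟩ := h; omega

def get_start_ind_of_context (doc : String) (start_ind_of_match : Int) (cws : Int) : Int :=
  if start_ind_of_match = 0 then 0
  else aLoop doc.toList start_ind_of_match 0 cws

-- ===== PORT B =====
-- the comprehension's predicate: i is the start of a word
def bIsStart (chars : List Char) (i : Nat) : Bool :=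
  (chars.getD i ' ' != ' ') && (i == 0 || chars.getD (i - 1) ' ' == ' ')

-- starts = [i for i in range(m) if ...]
def bStarts (chars : List Char) (m : Nat) : List Nat :=
  (List.range m).filter (bIsStart chars)

def get_start_ind_of_context_alt (doc : String) (start_ind_of_match : Int) (cws : Int) : Int :=
  if start_ind_of_match ≤ 0 ∨ cws ≤ 0 then start_ind_of_match
  else
    let chars := doc.toList
    let starts := bStarts chars (min start_ind_of_match.toNat chars.length)
    if cws ≤ (starts.length : Int) then
      ((starts.getD (starts.length - cws.toNat) 0 : Nat) : Int)
    else 0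

-- ===== PRECONDITION & SPEC =====
-- Pre_ excludes exactly the inputs where A raises IndexError: a start index past the end
-- of doc (and > 1) with a positive word count makes A's first doc[...] access go out of range.
def Pre_get_start_ind_of_context (doc : String) (start_ind_of_match : Int) (cws : Int) : Prop :=
  start_ind_of_match ≤ (doc.toList.length : Int) ∨ start_ind_of_match ≤ 1 ∨ cws ≤ 0
instance (doc : String) (start_ind_of_match : Int) (cws : Int) : Decidable (Pre_get_start_ind_of_context doc start_ind_of_match cws) := by unfold Pre_get_start_ind_of_context; infer_instance

def pvWitness_get_start_ind_of_context : String × Int × Int := ("only a few words", 11, 2)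

def Spec_get_start_ind_of_context (doc : String) (start_ind_of_match : Int) (cws : Int) (out : Int) : Prop := out = get_start_ind_of_context_alt doc start_ind_of_match cws
instance (doc : String) (start_ind_of_match : Int) (cws : Int) (out : Int) : Decidable (Spec_get_start_ind_of_context doc start_ind_of_match cws out) := by unfold Spec_get_start_ind_of_context; infer_instance

-- ===== CLAIM (what is proved, stated in full; the proofs are below) =====
def Claim_equal_get_start_ind_of_context : Prop := ∀ (doc : String) (start_ind_of_match : Int) (cws : Int), Dom_get_start_ind_of_context doc start_ind_of_match cws → Pre_get_start_ind_of_context doc start_ind_of_match cws → Spec_get_start_ind_of_context doc start_ind_of_match cws (get_start_ind_of_context doc start_ind_of_match cws)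

-- ===== LEMMAS AND PROOFS =====

lemma pyGetD_nat (doc : List Char) (j : Nat) (d : Char) :
    (PySem.List.pyGet? doc (j : Int)).getD d = doc.getD j d := by
  rw [PySem.List.pyGet?_natCast, List.getD_eq_getElem?_getD]

lemma bIsStart_false_left {chars : List Char} {i : Nat} (h : chars.getD i ' ' = ' ') :
    bIsStart chars i = false := by
  unfold bIsStart
  rw [h]
  simp

lemma bIsStart_false_right {chars : List Char} {i : Nat} (h1 : i ≠ 0)
    (h2 : chars.getD (i - 1) ' ' ≠ ' ') : bIsStart chars i = false := by
  unfold bIsStart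
  have e1 : (i == 0) = false := by simp [h1]
  have e2 : (chars.getD (i - 1) ' ' == ' ') = false := by simpa using h2
  rw [e1, e2]
  simp

lemma bIsStart_true {chars : List Char} {i : Nat} (h1 : chars.getD i ' ' ≠ ' ')
    (h2 : i = 0 ∨ chars.getD (i - 1) ' ' = ' ') : bIsStart chars i = true := by
  unfold bIsStart
  have e1 : (chars.getD i ' ' != ' ') = true := by simpa using h1
  rw [e1, Bool.true_and]
  rcases h2 with h | h
  · simp [h]
  · rw [h]
    simp

lemma aSkipSpaces_eq (doc : List Char) (j : Nat) :
    aSkipSpaces doc (j : Int) =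
      ((Nat.findGreatest (fun i => doc.getD i ' ' ≠ ' ') j : Nat) : Int) := by
  induction j with
  | zero => rw [aSkipSpaces]; simp
  | succ n ih =>
      rw [aSkipSpaces, pyGetD_nat doc (n + 1) ' ']
      by_cases hs : doc.getD (n + 1) ' ' = ' '
      · rw [dif_pos ⟨by omega, hs⟩,
            show ((n + 1 : Nat) : Int) - 1 = (n : Int) by push_cast; ring, ih,
            Nat.findGreatest_of_not (by simpa using hs)]
      · rw [dif_neg (by tauto), Nat.findGreatest_eq hs]

lemma aSkipNonspaces_eq (doc : List Char) (j : Nat) :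
    aSkipNonspaces doc (j : Int) =
      ((Nat.findGreatest (fun i => doc.getD i ' ' = ' ') j : Nat) : Int) := by
  induction j with
  | zero => rw [aSkipNonspaces]; simp
  | succ n ih =>
      rw [aSkipNonspaces, pyGetD_nat doc (n + 1) ' ']
      by_cases hs : doc.getD (n + 1) ' ' = ' '
      · rw [dif_neg (by tauto), Nat.findGreatest_eq hs]
      · rw [dif_pos ⟨by omega, hs⟩,
            show ((n + 1 : Nat) : Int) - 1 = (n : Int) by push_cast; ring, ih,
            Nat.findGreatest_of_not (by simpa using hs)]

lemma starts_nil (chars : List Char) (m : Nat)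
    (h : ∀ i, i < m → bIsStart chars i = false) : bStarts chars m = [] := by
  simp only [bStarts, List.filter_eq_nil_iff]
  intro i hi
  simp [h i (List.mem_range.mp hi)]

lemma starts_split (chars : List Char) (w m : Nat) (hw : w < m)
    (hs : bIsStart chars w = true)
    (hno : ∀ i, w < i → i < m → bIsStart chars i = false) :
    bStarts chars m = bStarts chars w ++ [w] := by
  induction m with
  | zero => omega
  | succ n ih =>
      rcases Nat.lt_succ_iff_lt_or_eq.mp hw with h | h
      · rw [bStarts, List.range_succ, List.filter_append,
            show (List.range n).filter (bIsStart chars) = bStarts chars w ++ [w] from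
              ih h (fun i hi1 hi2 => hno i hi1 (by omega))]
        simp [hno n h (by omega)]
      · subst h
        rw [bStarts, List.range_succ, List.filter_append]
        simp [hs]
        rfl

lemma nextLeft_spec (chars : List Char) (m : Nat) (h1 : 1 ≤ m) (_h2 : m ≤ chars.length) :
    (bStarts chars m = [] ∧ get_start_ind_of_next_word_to_left chars (m : Int) = 0) ∨
    (∃ w : Nat, w < m ∧ bStarts chars m = bStarts chars w ++ [w] ∧
      get_start_ind_of_next_word_to_left chars (m : Int) = (w : Int)) := by
  simp only [get_start_ind_of_next_word_to_left]
  rw [show (m : Int) - 1 = ((m - 1 : Nat) : Int) by omega, aSkipSpaces_eq]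
  set jn := Nat.findGreatest (fun i => chars.getD i ' ' ≠ ' ') (m - 1) with hjn
  obtain ⟨hjle, hPne, hgr⟩ := Nat.findGreatest_eq_iff.mp hjn.symm
  have hgreat : ∀ i, jn < i → i ≤ m - 1 → chars.getD i ' ' = ' ' := by
    intro i hi1 hi2
    by_contra hcon
    exact hgr hi1 hi2 hcon
  by_cases hj0 : jn = 0
  · -- j == 0: the helper returns 0
    rw [hj0, show ((0 : Nat) : Int) = 0 from by simp, if_pos rfl]
    by_cases hb0 : chars.getD 0 ' ' = ' '
    · left
      refine ⟨starts_nil chars m ?_, rfl⟩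
      intro i hi
      rcases Nat.eq_zero_or_pos i with h | h
      · rw [h]; exact bIsStart_false_left hb0
      · exact bIsStart_false_left (hgreat i (by omega) (by omega))
    · right
      refine ⟨0, by omega, ?_, rfl⟩
      exact starts_split chars 0 m (by omega) (bIsStart_true hb0 (Or.inl rfl))
        (fun i hi1 hi2 => bIsStart_false_left (hgreat i (by omega) (by omega)))
  · -- j >= 1
    have hjpos : 0 < jn := Nat.pos_of_ne_zero hj0
    have hPj : chars.getD jn ' ' ≠ ' ' := hPne hj0
    rw [if_neg (by simpa using hj0), aSkipNonspaces_eq]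
    set j2 := Nat.findGreatest (fun i => chars.getD i ' ' = ' ') jn with hj2
    obtain ⟨hj2le, hP2ne, hgr2⟩ := Nat.findGreatest_eq_iff.mp hj2.symm
    have hj2ne : j2 ≠ jn := by
      intro h
      apply hPj
      have hsp2 := hP2ne (by omega : j2 ≠ 0)
      rw [h] at hsp2
      exact hsp2
    have hgreat2 : ∀ i, j2 < i → i ≤ jn → chars.getD i ' ' ≠ ' ' := by
      intro i hi1 hi2
      exact hgr2 hi1 hi2
    rw [pyGetD_nat chars j2 ' ']
    by_cases hsp : chars.getD j2 ' ' = ' '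
    · -- doc[cur_ind] == ' ': return cur_ind + 1
      rw [if_pos hsp]
      have hj2lt : j2 < jn := lt_of_le_of_ne hj2le hj2ne
      right
      refine ⟨j2 + 1, by omega, ?_, by push_cast; ring⟩
      refine starts_split chars (j2 + 1) m (by omega) ?_ ?_
      · exact bIsStart_true (hgreat2 (j2 + 1) (by omega) (by omega))
          (Or.inr (by simpa using hsp))
      · intro i hi1 hi2
        by_cases hij : i ≤ jn
        · exact bIsStart_false_right (by omega) (hgreat2 (i - 1) (by omega) (by omega))
        · exact bIsStart_false_left (hgreat i (by omega) (by omega))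
    · -- return cur_ind, which must be 0 with a non-space at 0
      rw [if_neg hsp]
      have hj20 : j2 = 0 := by
        by_contra hne
        exact hsp (hP2ne hne)
      rw [hj20] at hsp hgreat2 ⊢
      rw [show ((0 : Nat) : Int) = 0 from by simp]
      right
      refine ⟨0, by omega, ?_, rfl⟩
      refine starts_split chars 0 m (by omega) (bIsStart_true hsp (Or.inl rfl)) ?_
      intro i hi1 hi2
      by_cases hij : i ≤ jn
      · rcases Nat.eq_or_lt_of_le (by omega : 1 ≤ i) with h | h
        · exact bIsStart_false_right (by omega) (by rw [← h]; simpa using hsp)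
        · exact bIsStart_false_right (by omega) (hgreat2 (i - 1) (by omega) (by omega))
      · exact bIsStart_false_left (hgreat i (by omega) (by omega))

lemma loop_spec (chars : List Char) : ∀ m : Nat, m ≤ chars.length → ∀ num c : Int, num < c →
    aLoop chars (m : Int) num c =
      if m = 0 then 0
      else if c - num ≤ ((bStarts chars m).length : Int) then
        (((bStarts chars m).getD ((bStarts chars m).length - (c - num).toNat) 0 : Nat) : Int)
      else 0 := by
  intro m
  induction m using Nat.strong_induction_on with
  | _ m ih =>
    intro hm num c hnc
    rcases Nat.eq_zero_or_pos m with hm0 | hmpos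
    · subst hm0
      rw [aLoop, dif_neg (by simp)]
      simp
    · rw [aLoop, dif_pos ⟨by exact_mod_cast hmpos, hnc⟩]
      conv_rhs => rw [if_neg (show ¬ m = 0 by omega)]
      rcases nextLeft_spec chars m hmpos hm with ⟨hnil, hnext⟩ | ⟨w, hwm, hsplit, hnext⟩
      · rw [hnext, aLoop, dif_neg (by simp), hnil]
        simp only [List.length_nil, Nat.cast_zero]
        rw [if_neg (by omega)]
      · rw [hnext, hsplit]
        simp only [List.length_append, List.length_cons, List.length_nil, Nat.zero_add]
        by_cases hc1 : num + 1 < c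
        · rw [ih w hwm (by omega) (num + 1) c hc1]
          by_cases hw0 : w = 0
          · subst hw0
            rw [if_pos rfl]
            have hS0 : bStarts chars 0 = [] := rfl
            simp only [hS0, List.length_nil, Nat.zero_add]
            rw [if_neg (by push_cast; omega)]
          · rw [if_neg hw0]
            by_cases hcl : c - (num + 1) ≤ ((bStarts chars w).length : Int)
            · rw [if_pos hcl,
                if_pos (show c - num ≤ (((bStarts chars w).length + 1 : Nat) : Int)
                  by push_cast; omega)]
              have hidx : (bStarts chars w).length + 1 - (c - num).toNat =
                  (bStarts chars w).length - (c - (num + 1)).toNat := by omega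
              rw [hidx, List.getD_append _ _ _ _ (by omega)]
            · rw [if_neg hcl, if_neg (by push_cast; omega)]
        · have hceq : c = num + 1 := by omega
          rw [aLoop, dif_neg (by omega),
            if_pos (show c - num ≤ (((bStarts chars w).length + 1 : Nat) : Int)
              by push_cast; omega),
            show (bStarts chars w).length + 1 - (c - num).toNat = (bStarts chars w).length
              by omega,
            List.getD_append_right _ _ _ _ (le_refl _)]
          simp

-- ===== VERDICT (by name: the statement is the Claim_ definition above) =====
theorem get_start_ind_of_context_spec : Claim_equal_get_start_ind_of_context := by
  intro doc s c _hdom hpre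
  unfold Spec_get_start_ind_of_context
  unfold get_start_ind_of_context get_start_ind_of_context_alt
  by_cases hs0 : s = 0
  · subst hs0; simp
  · rw [if_neg hs0]
    rcases lt_trichotomy s 0 with hneg | hz | hpos
    · rw [aLoop, dif_neg (by omega), if_pos (by omega)]
    · omega
    · by_cases hc : c ≤ 0
      · rw [aLoop, dif_neg (by omega), if_pos (by omega)]
      · rw [if_neg (by omega)]
        by_cases hlen : s ≤ (doc.toList.length : Int)
        · have hmin : min s.toNat doc.toList.length = s.toNat := by omega
          show aLoop doc.toList s 0 c =
            if c ≤ ((bStarts doc.toList (min s.toNat doc.toList.length)).length : Int) then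
              (((bStarts doc.toList (min s.toNat doc.toList.length)).getD
                ((bStarts doc.toList (min s.toNat doc.toList.length)).length - c.toNat) 0
                : Nat) : Int)
            else 0
          rw [hmin, show s = ((s.toNat : Nat) : Int) by omega,
             loop_spec doc.toList s.toNat (by omega) 0 c (by omega),
             if_neg (by omega)]
          simp only [sub_zero, Int.toNat_natCast]
        · have hs1 : s = 1 := by rcases hpre with h | h | h <;> omega
          have hchars : doc.toList = [] := List.length_eq_zero_iff.mp (by omega)
          rw [hs1, hchars]
          have h1 : aSkipSpaces ([] : List Char) ((1 : Int) - 1) = 0 := by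
            rw [aSkipSpaces, dif_neg (by norm_num)]
            norm_num
          have h2 : get_start_ind_of_next_word_to_left ([] : List Char) 1 = 0 := by
            simp only [get_start_ind_of_next_word_to_left]
            rw [h1]
            norm_num
          rw [aLoop, dif_pos ⟨by norm_num, by omega⟩, h2, aLoop, dif_neg (by omega)]
          show (0 : Int) =
            if c ≤ ((bStarts ([] : List Char) (min (1 : Int).toNat ([] : List Char).length)).length
                : Int) then
              (((bStarts ([] : List Char) (min (1 : Int).toNat ([] : List Char).length)).getD
                ((bStarts ([] : List Char)
                  (min (1 : Int).toNat ([] : List Char).length)).length - c.toNat) 0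
                : Nat) : Int)
            else 0
          rw [show bStarts ([] : List Char) (min (1 : Int).toNat ([] : List Char).length) = []
              from rfl]
          simp only [List.length_nil, Nat.cast_zero]
          rw [if_neg (by omega)]
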